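-- pv_equiv track=rewrite | github.com/pypi-data/pypi-mirror-397 | packages/stacksense-cli/stacksense_cli-0.1.3.tar.gz/stacksense_cli-0.1.3/src/stacksense/core/relationship_mapper.py | get_connected_files
-- ===== SOURCE A (Python) =====
-- from typing import Dict, List, Set, Tuple
--
-- def get_connected_files(
--
--     start_file: str,
--     graph: Dict[str, Set[str]],
--     max_depth: int = 2
-- ) -> Set[str]:
--     """
--     Get all files connected to start_file within max_depth.
--     Uses BFS traversal.
--     """
--     visited = set()
--     queue = [(start_file, 0)]  # (file, depth)
--
--     while queue:
--         current, depth = queue.pop(0)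
--
--         if current in visited or depth > max_depth:
--             continue
--
--         visited.add(current)
--
--         # Add neighbors
--         if current in graph:
--             for neighbor in graph[current]:
--                 if neighbor not in visited:
--                     queue.append((neighbor, depth + 1))
--
--     return visited
-- ===== SOURCE B (Python) =====
-- def get_connected_files(
--     start_file,
--     graph,
--     max_depth=2
-- ):
--     """Level-synchronous BFS: per-level frontier instead of a (node, depth) queue."""
--     visited = set()
--     frontier = [start_file]
--     depth = 0
--     while frontier and depth <= max_depth:
--         visited.update(frontier)
--         next_frontier = []
--         for u in frontier:
--             for n in graph.get(u, ()):
--                 if n not in visited and n not in next_frontier: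
--                     next_frontier.append(n)
--         frontier = next_frontier
--         depth += 1
--     return visited
-- ===== Notes on version B (the rewrite author's own statement) =====
-- stated objective: alternative
-- what changed: Replaces A's single FIFO queue of (node, depth) tuples with a level-synchronous BFS that keeps a per-level frontier list and one depth counter, deduplicating each next frontier as it is built instead of skipping already-visited queue entries at pop time.
import Mathlib
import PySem

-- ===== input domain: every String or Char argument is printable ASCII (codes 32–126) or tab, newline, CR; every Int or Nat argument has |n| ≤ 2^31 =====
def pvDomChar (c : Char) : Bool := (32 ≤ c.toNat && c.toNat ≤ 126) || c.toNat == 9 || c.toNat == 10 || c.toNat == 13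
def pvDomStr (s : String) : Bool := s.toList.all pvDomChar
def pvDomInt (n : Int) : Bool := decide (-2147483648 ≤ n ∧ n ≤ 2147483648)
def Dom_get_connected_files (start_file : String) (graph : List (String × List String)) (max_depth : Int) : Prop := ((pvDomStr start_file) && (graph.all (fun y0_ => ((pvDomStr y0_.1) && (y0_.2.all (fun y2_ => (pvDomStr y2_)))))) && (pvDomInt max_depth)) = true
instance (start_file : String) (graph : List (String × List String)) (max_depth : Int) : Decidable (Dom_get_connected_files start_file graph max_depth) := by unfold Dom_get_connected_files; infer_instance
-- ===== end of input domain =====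

-- B replaces A's single (node, depth) FIFO queue by a level-synchronous BFS (per-level frontier list
-- plus a depth counter); same returned set of files (alternative decomposition, no speed claim).
-- Both Pythons return a Python set; per the type convention the ports return its distinct elements as a list.

-- `graph.get(current, ())` / `if current in graph: graph[current]`: first-match lookup of the key, [] if absent
def gcfNbrs (graph : List (String × List String)) (c : String) : List String :=
  ((PySem.Dict.mk graph).get? c).getD []

-- used by the termination measure of Port A's loop: every node name the graph can ever enqueue
def gcfUniv (graph : List (String × List String)) : List String :=
  graph.flatMap (fun p => p.1 :: p.2)

theorem mem_gcfNbrs_mem_univ (graph : List (String × List String)) (c x : String)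
    (hx : x ∈ gcfNbrs graph c) : x ∈ gcfUniv graph := by
  induction graph with
  | nil => simp [gcfNbrs, PySem.Dict.get?] at hx
  | cons p rest ih =>
    rcases p with ⟨k, vs⟩
    rw [gcfNbrs, PySem.Dict.get?_mk_cons] at hx
    simp only [gcfUniv, List.flatMap_cons, List.mem_append, List.mem_cons]
    by_cases hk : (k == c) = true
    · rw [if_pos hk] at hx
      simp only [Option.getD_some] at hx
      exact Or.inl (Or.inr hx)
    · rw [if_neg hk] at hx
      have := ih hx
      simp only [gcfUniv, List.mem_flatMap] at this
      rcases this with ⟨q, hq, hxq⟩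
      exact Or.inr (List.mem_flatMap.mpr ⟨q, hq, hxq⟩)

-- ===== PORT A =====
-- A's BFS loop: queue of (file, depth) pairs, pop from the front, skip visited / too-deep entries.
-- (A's `while queue` terminates because every visit removes an unvisited name from the finite pool
-- of queue names plus graph names; that pool, paired with the queue length, is the measure.)
def gcfLoop (graph : List (String × List String)) (max_depth : Int)
    (q : List (String × Int)) (visited : PySem.Set String) : List String :=
  match q with
  | [] => visited
  | (current, depth) :: rest =>
    if PySem.Set.contains visited current || decide (max_depth < depth) then
      gcfLoop graph max_depth rest visited
    else
      let visited' := PySem.Set.add visited current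
      gcfLoop graph max_depth
        (rest ++ ((gcfNbrs graph current).filter
            (fun n => !(PySem.Set.contains visited' n))).map (fun n => (n, depth + 1)))
        visited'
termination_by
  (((q.map Prod.fst ++ gcfUniv graph).toFinset \ visited.toFinset).card, q.length)
decreasing_by
  · -- skip branch: the name pool shrinks or stays, the queue gets shorter
    refine Prod.lex_iff.mpr ?_
    dsimp only
    have hsub : ((rest.map Prod.fst ++ gcfUniv graph).toFinset \ visited.toFinset) ⊆
        ((((current, depth) :: rest).map Prod.fst ++ gcfUniv graph).toFinset \ visited.toFinset) := by
      intro x hx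
      simp only [Finset.mem_sdiff, List.mem_toFinset, List.mem_append, List.map_cons,
        List.mem_cons] at hx ⊢
      tauto
    rcases lt_or_eq_of_le (Finset.card_le_card hsub) with h | h
    · exact Or.inl h
    · exact Or.inr ⟨h, by simp⟩
  · -- visit branch: `current` leaves the unvisited name pool for good
    refine Prod.lex_iff.mpr (Or.inl ?_)
    dsimp only
    rename_i hcond
    have hcur : current ∉ visited := by
      intro hm
      apply hcond
      simp only [Bool.or_eq_true, decide_eq_true_eq]
      left
      rw [PySem.Set.contains_eq_listContains]
      exact List.contains_iff_mem.mpr hm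
    have hadd : PySem.Set.add visited current = visited ++ [current] :=
      PySem.Set.add_of_not_mem hcur
    apply Finset.card_lt_card
    rw [Finset.ssubset_def]
    constructor
    · intro x hx
      simp only [Finset.mem_sdiff, List.mem_toFinset] at hx ⊢
      obtain ⟨hx1, hx2⟩ := hx
      rw [hadd] at hx2
      refine ⟨?_, fun hv => hx2 (List.mem_append.mpr (Or.inl hv))⟩
      rcases List.mem_append.mp hx1 with h | h
      · rw [List.map_append] at h
        rcases List.mem_append.mp h with h | h
        · refine List.mem_append.mpr (Or.inl ?_)
          rw [List.map_cons]
          exact List.mem_cons_of_mem _ h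
        · rw [List.map_map] at h
          obtain ⟨n, hn, hxn⟩ := List.mem_map.mp h
          have hnx : n = x := hxn
          subst hnx
          exact List.mem_append.mpr
            (Or.inr (mem_gcfNbrs_mem_univ graph current n (List.mem_filter.mp hn).1))
      · exact List.mem_append.mpr (Or.inr h)
    · intro hsup
      have hc : current ∈ ((((current, depth) :: rest).map Prod.fst ++ gcfUniv graph).toFinset \
          visited.toFinset) := by
        simp only [Finset.mem_sdiff, List.mem_toFinset]
        refine ⟨List.mem_append.mpr (Or.inl ?_), hcur⟩
        rw [List.map_cons]
        exact List.mem_cons_self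
      have h2 := hsup hc
      simp only [Finset.mem_sdiff, List.mem_toFinset, hadd] at h2
      exact h2.2 (List.mem_append.mpr (Or.inr (List.mem_singleton.mpr rfl)))

def get_connected_files (start_file : String) (graph : List (String × List String))
    (max_depth : Int) : List String :=
  gcfLoop graph max_depth [(start_file, 0)] PySem.Set.empty

-- ===== PORT B =====
-- B's loop: `while frontier and depth <= max_depth`, visiting a whole level at a time;
-- it recurses on the remaining depth budget (max_depth - depth), which the guard keeps nonnegative.
def gcfAltLoop (graph : List (String × List String)) (max_depth : Int)
    (visited : PySem.Set String) (frontier : List String) (depth : Int) : List String :=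
  if frontier.isEmpty || decide (max_depth < depth) then visited
  else
    let visited' := PySem.Set.update visited frontier
    let next := frontier.foldl (fun nxt u =>
      (gcfNbrs graph u).foldl
        (fun nxt n =>
          if PySem.Set.contains visited' n || nxt.contains n then nxt else nxt ++ [n]) nxt) []
    gcfAltLoop graph max_depth visited' next (depth + 1)
termination_by (max_depth + 1 - depth).toNat
decreasing_by
  rename_i h
  have hd : depth ≤ max_depth := not_lt.mp (fun hlt => h (by simp [hlt]))
  exact (Int.toNat_lt_toNat (by linarith)).mpr (by linarith)

def get_connected_files_alt (start_file : String) (graph : List (String × List String))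
    (max_depth : Int) : List String :=
  gcfAltLoop graph max_depth PySem.Set.empty [start_file] 0

-- ===== PRECONDITION & SPEC =====
def Spec_get_connected_files (start_file : String) (graph : List (String × List String)) (max_depth : Int) (out : List String) : Prop := out = get_connected_files_alt start_file graph max_depth
instance (start_file : String) (graph : List (String × List String)) (max_depth : Int) (out : List String) : Decidable (Spec_get_connected_files start_file graph max_depth out) := by unfold Spec_get_connected_files; infer_instance

-- ===== CLAIM (what is proved, stated in full; the proofs are below) =====
def Claim_equal_get_connected_files : Prop := ∀ (start_file : String) (graph : List (String × List String)) (max_depth : Int), Dom_get_connected_files start_file graph max_depth → Spec_get_connected_files start_file graph max_depth (get_connected_files start_file graph max_depth)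

-- ===== LEMMAS AND PROOFS =====

theorem gcf_contains_true {v : List String} {c : String} :
    PySem.Set.contains v c = true ↔ c ∈ v := by
  rw [PySem.Set.contains_eq_listContains]
  exact List.contains_iff_mem

-- `gcfCleanup l v` = the elements of l not in v, first occurrences only, in order
-- (exactly the nodes A actually visits when it processes the queue entries l against visited set v)
def gcfCleanup : List String → List String → List String
  | [], _ => []
  | x :: l, v => if x ∈ v then gcfCleanup l v else x :: gcfCleanup l (v ++ [x])

-- one A-level: process all of `pending` at one depth: final visited and the enqueued next level
def gcfLevelA (graph : List (String × List String)) :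
    List String → List String → List String → List String × List String
  | [], v, acc => (v, acc)
  | c :: p, v, acc =>
    if c ∈ v then gcfLevelA graph p v acc
    else gcfLevelA graph p (v ++ [c])
      (acc ++ (gcfNbrs graph c).filter (fun n => !(PySem.Set.contains (v ++ [c]) n)))

-- the entries A appends while processing `pending` from visited `v`
def gcfCollect (graph : List (String × List String)) : List String → List String → List String
  | [], _ => []
  | c :: p, v =>
    if c ∈ v then gcfCollect graph p v
    else (gcfNbrs graph c).filter (fun n => !(PySem.Set.contains (v ++ [c]) n))
      ++ gcfCollect graph p (v ++ [c])

theorem mem_gcfCleanup {l v : List String} {x : String} (hx : x ∈ gcfCleanup l v) :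
    x ∈ l ∧ x ∉ v := by
  induction l generalizing v with
  | nil => simp [gcfCleanup] at hx
  | cons y l ih =>
    rw [gcfCleanup] at hx
    by_cases hy : y ∈ v
    · rw [if_pos hy] at hx
      have := ih hx
      exact ⟨List.mem_cons_of_mem _ this.1, this.2⟩
    · rw [if_neg hy] at hx
      rcases List.mem_cons.mp hx with rfl | hx
      · exact ⟨List.mem_cons_self, hy⟩
      · have := ih hx
        have h2 := this.2
        simp only [List.mem_append, List.mem_singleton, not_or] at h2
        exact ⟨List.mem_cons_of_mem _ this.1, h2.1⟩

theorem not_mem_of_mem_gcfCleanup {l v : List String} {x : String}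
    (hx : x ∈ gcfCleanup l v) : x ∉ v := (mem_gcfCleanup hx).2

theorem nodup_gcfCleanup (l v : List String) : (gcfCleanup l v).Nodup := by
  induction l generalizing v with
  | nil => simp [gcfCleanup]
  | cons y l ih =>
    rw [gcfCleanup]
    by_cases hy : y ∈ v
    · rw [if_pos hy]; exact ih v
    · rw [if_neg hy]
      refine List.nodup_cons.mpr ⟨fun hm => ?_, ih _⟩
      have := not_mem_of_mem_gcfCleanup hm
      simp at this

theorem gcfCleanup_eq_nil_iff (l v : List String) :
    gcfCleanup l v = [] ↔ ∀ x ∈ l, x ∈ v := by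
  induction l generalizing v with
  | nil => simp [gcfCleanup]
  | cons y l ih =>
    rw [gcfCleanup]
    by_cases hy : y ∈ v
    · rw [if_pos hy, ih]
      constructor
      · intro h x hx
        rcases List.mem_cons.mp hx with rfl | hx
        · exact hy
        · exact h x hx
      · intro h x hx
        exact h x (List.mem_cons_of_mem _ hx)
    · rw [if_neg hy]
      constructor
      · intro h; exact absurd h (List.cons_ne_nil _ _)
      · intro h; exact absurd (h y List.mem_cons_self) hy

-- deleting elements that the filter set already contains does not change a cleanup
theorem gcfCleanup_filter (l w : List String) (p : String → Bool)
    (h : ∀ x ∈ l, p x = false → x ∈ w) :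
    gcfCleanup (l.filter p) w = gcfCleanup l w := by
  induction l generalizing w with
  | nil => simp
  | cons y l ih =>
    by_cases hp : p y = true
    · rw [List.filter_cons_of_pos hp, gcfCleanup, gcfCleanup]
      by_cases hy : y ∈ w
      · rw [if_pos hy, if_pos hy]
        exact ih w (fun x hx => h x (List.mem_cons_of_mem _ hx))
      · rw [if_neg hy, if_neg hy]
        refine congrArg _ (ih (w ++ [y]) ?_)
        intro x hx hpx
        exact List.mem_append.mpr (Or.inl (h x (List.mem_cons_of_mem _ hx) hpx))
    · rw [List.filter_cons_of_neg (by simpa using hp), gcfCleanup]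
      have hy : y ∈ w := h y List.mem_cons_self (by simpa using hp)
      rw [if_pos hy]
      exact ih w (fun x hx => h x (List.mem_cons_of_mem _ hx))

theorem gcfCleanup_append (a b w : List String) :
    gcfCleanup (a ++ b) w = gcfCleanup a w ++ gcfCleanup b (w ++ gcfCleanup a w) := by
  induction a generalizing w with
  | nil => simp [gcfCleanup]
  | cons y a ih =>
    rw [List.cons_append, gcfCleanup, gcfCleanup]
    by_cases hy : y ∈ w
    · rw [if_pos hy, if_pos hy]; exact ih w
    · rw [if_neg hy, if_neg hy, List.cons_append, ih (w ++ [y])]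
      simp [List.append_assoc]

-- A's per-level bookkeeping, split into its two components
theorem gcfLevelA_fst (graph : List (String × List String)) (pending v acc : List String) :
    (gcfLevelA graph pending v acc).1 = v ++ gcfCleanup pending v := by
  induction pending generalizing v acc with
  | nil => simp [gcfLevelA, gcfCleanup]
  | cons c p ih =>
    rw [gcfLevelA, gcfCleanup]
    by_cases hc : c ∈ v
    · rw [if_pos hc, if_pos hc]; exact ih v acc
    · rw [if_neg hc, if_neg hc, ih]
      simp [List.append_assoc]

theorem gcfLevelA_snd (graph : List (String × List String)) (pending v acc : List String) :
    (gcfLevelA graph pending v acc).2 = acc ++ gcfCollect graph pending v := by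
  induction pending generalizing v acc with
  | nil => simp [gcfLevelA, gcfCollect]
  | cons c p ih =>
    rw [gcfLevelA, gcfCollect]
    by_cases hc : c ∈ v
    · rw [if_pos hc, if_pos hc]; exact ih v acc
    · rw [if_neg hc, if_neg hc, ih]
      simp [List.append_assoc]

-- once every intermediate visited set lies inside W, A's interleaved filters are invisible to a
-- cleanup against W: collecting over fA equals collecting over its cleaned frontier
theorem gcfCollect_cleanup (graph : List (String × List String)) :
    ∀ (fA v W : List String), (∀ x ∈ v, x ∈ W) → (∀ x ∈ gcfCleanup fA v, x ∈ W) →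
    gcfCleanup (gcfCollect graph fA v) W
      = gcfCleanup ((gcfCleanup fA v).flatMap (gcfNbrs graph)) W := by
  intro fA
  induction fA with
  | nil => intro v W _ _; simp [gcfCollect, gcfCleanup]
  | cons c p ih =>
    intro v W hv hcl
    rw [gcfCollect, gcfCleanup] at *
    by_cases hc : c ∈ v
    · simp only [if_pos hc] at hcl ⊢
      exact ih v W hv hcl
    · simp only [if_neg hc] at hcl ⊢
      rw [List.flatMap_cons, gcfCleanup_append, gcfCleanup_append]
      have hcW : c ∈ W := hcl c List.mem_cons_self
      have h1 : gcfCleanup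
            ((gcfNbrs graph c).filter (fun n => !(PySem.Set.contains (v ++ [c]) n))) W
          = gcfCleanup (gcfNbrs graph c) W := by
        refine gcfCleanup_filter _ _ _ ?_
        intro x _ hpx
        simp only [Bool.not_eq_false', gcf_contains_true] at hpx
        rcases List.mem_append.mp hpx with h | h
        · exact hv x h
        · rw [List.mem_singleton] at h; subst h; exact hcW
      rw [h1]
      refine congrArg _ (ih (v ++ [c]) _ ?_ ?_)
      · intro x hx
        rcases List.mem_append.mp hx with h | h
        · exact List.mem_append.mpr (Or.inl (hv x h))
        · rw [List.mem_singleton] at h; subst h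
          exact List.mem_append.mpr (Or.inl hcW)
      · intro x hx
        exact List.mem_append.mpr (Or.inl (hcl x (List.mem_cons_of_mem _ hx)))

-- B's inner fold builds exactly a cleanup of the neighbour list against visited' plus what is there
theorem gcfFold_inner (v' : List String) (L acc : List String) :
    L.foldl (fun nxt n =>
        if PySem.Set.contains v' n || nxt.contains n then nxt else nxt ++ [n]) acc
      = acc ++ gcfCleanup L (v' ++ acc) := by
  induction L generalizing acc with
  | nil => simp [gcfCleanup]
  | cons n L ih =>
    rw [List.foldl_cons, gcfCleanup]
    by_cases hn : n ∈ v' ++ acc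
    · rw [if_pos hn]
      have hcond : (PySem.Set.contains v' n || acc.contains n) = true := by
        simp only [Bool.or_eq_true, gcf_contains_true, List.contains_iff_mem]
        exact List.mem_append.mp hn
      rw [if_pos hcond]
      exact ih acc
    · rw [if_neg hn]
      have hcond : ¬ ((PySem.Set.contains v' n || acc.contains n) = true) := by
        simp only [Bool.or_eq_true, gcf_contains_true, List.contains_iff_mem]
        intro h
        exact hn (List.mem_append.mpr h)
      rw [if_neg hcond, ih (acc ++ [n])]
      simp [List.append_assoc]

theorem gcfFold_next (graph : List (String × List String)) (v' frontier : List String) :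
    frontier.foldl (fun nxt u =>
        (gcfNbrs graph u).foldl (fun nxt n =>
          if PySem.Set.contains v' n || nxt.contains n then nxt else nxt ++ [n]) nxt) []
      = gcfCleanup (frontier.flatMap (gcfNbrs graph)) v' := by
  rw [← List.foldl_flatMap, gcfFold_inner]
  simp

-- A skips a whole level whose depth exceeds max_depth
theorem gcfLoop_overmax (graph : List (String × List String)) (max_depth d : Int)
    (hd : max_depth < d) (l : List String) (v : List String) :
    gcfLoop graph max_depth (l.map (fun n => (n, d))) v = v := by
  induction l with
  | nil => rw [List.map_nil, gcfLoop.eq_def]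
  | cons c l ih =>
    rw [List.map_cons, gcfLoop.eq_def]
    dsimp only
    rw [if_pos (by simp only [Bool.or_eq_true, decide_eq_true_eq]; exact Or.inr hd)]
    exact ih

-- A skips a whole level of already-visited entries
theorem gcfLoop_all_visited (graph : List (String × List String)) (max_depth d : Int)
    (l v : List String) (h : ∀ x ∈ l, x ∈ v) :
    gcfLoop graph max_depth (l.map (fun n => (n, d))) v = v := by
  induction l with
  | nil => rw [List.map_nil, gcfLoop.eq_def]
  | cons c l ih =>
    rw [List.map_cons, gcfLoop.eq_def]
    dsimp only
    rw [if_pos (by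
      simp only [Bool.or_eq_true, gcf_contains_true]
      exact Or.inl (h c List.mem_cons_self))]
    exact ih (fun x hx => h x (List.mem_cons_of_mem _ hx))

-- A's queue processes level by level: entries at depth d, then the accumulated depth-(d+1) tail
theorem gcfLoop_level (graph : List (String × List String)) (max_depth d : Int)
    (hd : ¬ max_depth < d) (pending acc : List String) (v : List String) :
    gcfLoop graph max_depth
        (pending.map (fun n => (n, d)) ++ acc.map (fun n => (n, d + 1))) v
      = gcfLoop graph max_depth
          ((gcfLevelA graph pending v acc).2.map (fun n => (n, d + 1)))
          (gcfLevelA graph pending v acc).1 := by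
  induction pending generalizing v acc with
  | nil => simp [gcfLevelA]
  | cons c p ih =>
    rw [List.map_cons, List.cons_append, gcfLoop.eq_def]
    dsimp only
    rw [gcfLevelA]
    by_cases hc : c ∈ v
    · rw [if_pos (by simp only [Bool.or_eq_true, gcf_contains_true]; exact Or.inl hc),
        if_pos hc]
      exact ih acc v
    · rw [if_neg (by
        simp only [Bool.or_eq_true, gcf_contains_true, decide_eq_true_eq]
        exact not_or.mpr ⟨hc, hd⟩), if_neg hc]
      have hadd : PySem.Set.add v c = v ++ [c] := PySem.Set.add_of_not_mem hc
      rw [hadd]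
      have hq : (p.map (fun n => (n, d)) ++ acc.map (fun n => (n, d + 1))) ++
            ((gcfNbrs graph c).filter (fun n => !(PySem.Set.contains (v ++ [c]) n))).map
              (fun n => (n, d + 1))
          = p.map (fun n => (n, d)) ++
            (acc ++ (gcfNbrs graph c).filter (fun n => !(PySem.Set.contains (v ++ [c]) n))).map
              (fun n => (n, d + 1)) := by
        simp [List.append_assoc]
      rw [hq]
      exact ih _ (v ++ [c])

-- the main simulation: A from a depth-d queue over fA equals B from the cleaned frontier of fA
theorem gcf_sim (graph : List (String × List String)) (max_depth : Int) :
    ∀ (n : Nat) (d : Int) (fA fB v : List String),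
      n = (max_depth + 1 - d).toNat → fB = gcfCleanup fA v →
      gcfLoop graph max_depth (fA.map (fun n => (n, d))) v
        = gcfAltLoop graph max_depth v fB d := by
  intro n
  induction n with
  | zero =>
    intro d fA fB v hn hfB
    have hd : max_depth < d := by omega
    rw [gcfLoop_overmax graph max_depth d hd, gcfAltLoop.eq_def]
    rw [if_pos (by simp [hd])]
  | succ m ih =>
    intro d fA fB v hn hfB
    by_cases hd : max_depth < d
    · rw [gcfLoop_overmax graph max_depth d hd, gcfAltLoop.eq_def]
      rw [if_pos (by simp [hd])]
    · by_cases hfBe : fB = []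
      · subst hfBe
        have hall : ∀ x ∈ fA, x ∈ v := (gcfCleanup_eq_nil_iff fA v).mp hfB.symm
        rw [gcfLoop_all_visited graph max_depth d fA v hall, gcfAltLoop.eq_def]
        rw [if_pos (by simp)]
      · -- one level on each side
        rw [gcfAltLoop.eq_def]
        rw [if_neg (by simp [List.isEmpty_iff, hfBe, hd])]
        have hdisj : ∀ x ∈ fB, x ∉ v := fun x hx =>
          not_mem_of_mem_gcfCleanup (hfB ▸ hx)
        have hnodup : fB.Nodup := hfB ▸ nodup_gcfCleanup fA v
        have hupd : PySem.Set.update v fB = v ++ fB :=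
          PySem.Set.update_eq_append_of_disjoint v fB hnodup hdisj
        dsimp only
        rw [hupd, gcfFold_next]
        -- A side: decompose the level
        rw [show fA.map (fun n => (n, d)) =
              fA.map (fun n => (n, d)) ++ ([] : List String).map (fun n => (n, d + 1)) by simp,
          gcfLoop_level graph max_depth d hd fA [] v,
          gcfLevelA_fst, gcfLevelA_snd]
        simp only [List.nil_append, ← hfB]
        refine ih (d + 1) (gcfCollect graph fA v) _ (v ++ fB) (by omega) ?_
        rw [gcfCollect_cleanup graph fA v (v ++ fB)
          (fun x hx => List.mem_append.mpr (Or.inl hx))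
          (fun x hx => List.mem_append.mpr (Or.inr (hfB ▸ hx))), hfB]

-- ===== VERDICT (by name: the statement is the Claim_ definition above) =====
theorem get_connected_files_spec : Claim_equal_get_connected_files := by
  intro start_file graph max_depth _
  unfold Spec_get_connected_files get_connected_files get_connected_files_alt
  have h0 : [(start_file, (0 : Int))] = [start_file].map (fun n => (n, (0 : Int))) := by simp
  rw [h0]
  exact gcf_sim graph max_depth (max_depth + 1 - 0).toNat 0 [start_file] [start_file]
    PySem.Set.empty rfl (by rfl)
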